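-- pv_equiv track=rewrite | github.com/ryujonghyeok/MultiLexNorm2026 | utils.py | mfr
-- ===== SOURCE A (Python) =====
-- def mfr(input_sent, counts):
--     predictions = []
--     for word in input_sent:
--         if word in counts:
--             replacement = max(counts[word], key=counts[word].get)
--         else:
--             replacement = word
--         predictions.append(replacement)
--     return predictions
-- ===== SOURCE B (Python) =====
-- def mfr(input_sent, counts):
--     # Precompute the best replacement once per distinct word, then do plain lookups.
--     # (Entries with an empty count dict get no table entry; A raises ValueError if
--     # such a word is queried -- those inputs are outside Pre_.)
--     best = {w: max(d, key=d.get) for w, d in counts.items() if d}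
--     return [best.get(word, word) for word in input_sent]
-- ===== Notes on version B (the rewrite author's own statement) =====
-- stated objective: alternative
-- what changed: B precomputes one replacement table (argmax per counts entry, computed once) and then maps plain dict lookups over the sentence, instead of recomputing the inline argmax for every word occurrence; measured only 1.36x at the largest size, so no speed is claimed.
-- crash fix: When some word of input_sent maps to an empty inner dict in counts, A raises ValueError (max of an empty sequence) while B returns the word unchanged. — e.g. on mfr(["u"], [("u", [])]): A raises ValueError, B returns ["u"]
import Mathlib
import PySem

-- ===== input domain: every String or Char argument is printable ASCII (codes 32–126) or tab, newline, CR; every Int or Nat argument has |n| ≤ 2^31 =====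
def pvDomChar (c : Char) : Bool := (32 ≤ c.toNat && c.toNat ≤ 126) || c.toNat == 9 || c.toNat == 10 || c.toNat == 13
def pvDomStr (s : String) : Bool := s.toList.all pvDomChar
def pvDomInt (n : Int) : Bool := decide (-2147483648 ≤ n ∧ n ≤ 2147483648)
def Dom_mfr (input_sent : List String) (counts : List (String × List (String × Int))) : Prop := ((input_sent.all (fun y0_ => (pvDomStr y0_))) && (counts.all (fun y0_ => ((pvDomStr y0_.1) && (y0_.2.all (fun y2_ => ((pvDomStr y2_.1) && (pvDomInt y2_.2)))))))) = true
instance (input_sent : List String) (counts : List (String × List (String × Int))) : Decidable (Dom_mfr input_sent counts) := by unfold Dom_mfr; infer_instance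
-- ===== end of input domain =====

-- B precomputes the whole replacement table once (argmax per counts entry) and then only
-- looks words up, instead of recomputing the inline argmax for every word occurrence.


-- ===== PORT A =====
-- 'max(counts[word], key=counts[word].get)' over a dict iterates the keys in insertion
-- order and keeps the FIRST maximal one = PySem.List.max? over the items keyed by the value.
-- 'none' there means the inner dict was empty: Python raises ValueError, excluded by Pre_mfr
-- (the total port returns 'word' there; nothing is claimed about such inputs).
def mfr (input_sent : List String) (counts : List (String × List (String × Int))) : List String :=
  input_sent.foldl
    (fun predictions word =>
      let replacement :=
        if (PySem.Dict.mk counts).contains word then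
          match PySem.List.max? ((PySem.Dict.mk counts).getD word []) (fun p => p.2) with
          | some m => m.1
          | none => word
        else word
      predictions ++ [replacement])
    []

-- ===== PORT B =====
-- the dict comprehension 'best = {w: max(d, key=d.get) for w, d in counts.items() if d}':
-- max? is 'none' exactly when d is empty, i.e. exactly when the 'if d' guard skips the entry.
def mfrBest (counts : List (String × List (String × Int))) : PySem.Dict String String :=
  counts.foldl
    (fun best wd =>
      match PySem.List.max? wd.2 (fun p => p.2) with
      | some m => best.insert wd.1 m.1
      | none => best)
    PySem.Dict.empty

-- '[best.get(word, word) for word in input_sent]'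
def mfr_alt (input_sent : List String) (counts : List (String × List (String × Int))) : List String :=
  input_sent.map (fun word => (mfrBest counts).getD word word)

-- ===== PRECONDITION & SPEC =====
-- Pre_ requires (a) distinct outer keys — 'counts' ports a Python dict, whose association-list
-- image cannot repeat a key, so this excludes no Python input — and (b) that no queried word
-- maps to an empty inner dict: there Python A raises ValueError (max of an empty sequence).
def Pre_mfr (input_sent : List String) (counts : List (String × List (String × Int))) : Prop :=
  (counts.map Prod.fst).Nodup ∧
  ∀ word ∈ input_sent, ∀ p ∈ counts, p.1 = word → p.2 ≠ []
instance (input_sent : List String) (counts : List (String × List (String × Int))) : Decidable (Pre_mfr input_sent counts) := by unfold Pre_mfr; infer_instance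

def pvWitness_mfr : List String × (List (String × List (String × Int))) :=
  (["lol", "ok"], [("lol", [("laugh", 3), ("haha", 1)])])

-- When some word of input_sent maps to an empty inner dict in counts, A raises ValueError
-- (max of an empty sequence) while B returns the word unchanged.
def Raises_mfr (input_sent : List String) (counts : List (String × List (String × Int))) : Prop :=
  ∃ word ∈ input_sent, ∃ p ∈ counts, p.1 = word ∧ p.2 = []
instance (input_sent : List String) (counts : List (String × List (String × Int))) : Decidable (Raises_mfr input_sent counts) := by unfold Raises_mfr; infer_instance

def pvRaiseWitness_mfr : List String × (List (String × List (String × Int))) :=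
  (["u"], [("u", [])])
def pvRaiseWitnessOut_mfr : List String := ["u"]

def Spec_mfr (input_sent : List String) (counts : List (String × List (String × Int))) (out : List String) : Prop := out = mfr_alt input_sent counts
instance (input_sent : List String) (counts : List (String × List (String × Int))) (out : List String) : Decidable (Spec_mfr input_sent counts out) := by unfold Spec_mfr; infer_instance

-- ===== CLAIM (what is proved, stated in full; the proofs are below) =====
def Claim_equal_mfr : Prop := ∀ (input_sent : List String) (counts : List (String × List (String × Int))), Dom_mfr input_sent counts → Pre_mfr input_sent counts → Spec_mfr input_sent counts (mfr input_sent counts)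

def Claim_raises_mfr : Prop := (∀ (input_sent : List String) (counts : List (String × List (String × Int))), Dom_mfr input_sent counts → Raises_mfr input_sent counts → ¬ Pre_mfr input_sent counts) ∧ (Dom_mfr (pvRaiseWitness_mfr.1) (pvRaiseWitness_mfr.2) ∧ Raises_mfr (pvRaiseWitness_mfr.1) (pvRaiseWitness_mfr.2) ∧ mfr_alt (pvRaiseWitness_mfr.1) (pvRaiseWitness_mfr.2) = pvRaiseWitnessOut_mfr)

-- ===== LEMMAS AND PROOFS =====

-- B's table lookup, characterised against the source association list (generalised accumulator).
theorem mfrBest_foldl_get? (counts : List (String × List (String × Int)))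
    (b : PySem.Dict String String) (w : String)
    (h : (counts.map Prod.fst).Nodup) :
    (counts.foldl
      (fun best wd =>
        match PySem.List.max? wd.2 (fun p => p.2) with
        | some m => best.insert wd.1 m.1
        | none => best) b).get? w =
    (match (PySem.Dict.mk counts).get? w with
     | some d =>
        match PySem.List.max? d (fun p => p.2) with
        | some m => some m.1
        | none => b.get? w
     | none => b.get? w) := by
  induction counts generalizing b with
  | nil => rfl
  | cons kd rest ih =>
    obtain ⟨k, d⟩ := kd
    simp only [List.map_cons, List.nodup_cons] at h
    rw [List.foldl_cons, ih _ h.2, PySem.Dict.get?_mk_cons]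
    by_cases hw : k = w
    · subst hw
      have hnone : (PySem.Dict.mk rest).get? k = none := by
        rw [PySem.Dict.get?_eq_none_iff_not_mem_keys, PySem.Dict.keys_mk]
        exact h.1
      rw [hnone]
      simp only [beq_self_eq_true, if_true]
      cases hmx : PySem.List.max? d (fun p => p.2) with
      | some m => simp [PySem.Dict.get?_insert_self]
      | none => simp
  -- k ≠ w: the head entry never touches key w
    · have hbeq : (k == w) = false := by simp [hw]
      rw [hbeq]
      simp only [Bool.false_eq_true, if_false]
      cases hr : (PySem.Dict.mk rest).get? w with
      | some d' =>
        cases hmx' : PySem.List.max? d' (fun p => p.2) with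
        | some m' => simp [hmx']
        | none =>
          cases hmx : PySem.List.max? d (fun p => p.2) with
          | some m => simp [PySem.Dict.get?_insert_of_ne _ _ (Ne.symm hw)]
          | none => simp
      | none =>
        cases hmx : PySem.List.max? d (fun p => p.2) with
        | some m => simp [PySem.Dict.get?_insert_of_ne _ _ (Ne.symm hw)]
        | none => simp

-- per-word agreement of the two programs (needs only distinct outer keys)
theorem mfr_word_eq (counts : List (String × List (String × Int)))
    (h : (counts.map Prod.fst).Nodup) (word : String) :
    (if (PySem.Dict.mk counts).contains word then
        match PySem.List.max? ((PySem.Dict.mk counts).getD word []) (fun p => p.2) with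
        | some m => m.1
        | none => word
      else word) = (mfrBest counts).getD word word := by
  rw [mfrBest]
  conv_rhs => rw [PySem.Dict.getD_eq_get?_getD]
  rw [mfrBest_foldl_get? counts PySem.Dict.empty word h]
  rw [PySem.Dict.contains_eq_isSome_get?]
  cases hg : (PySem.Dict.mk counts).get? word with
  | none => simp [PySem.Dict.get?_empty]
  | some d =>
    rw [PySem.Dict.getD_eq_get?_getD, hg]
    cases hmx : PySem.List.max? d (fun p => p.2) with
    | some m => simp [hmx]
    | none => simp [hmx, PySem.Dict.get?_empty]

-- ===== VERDICT (by name: the statement is the Claim_ definition above) =====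
theorem mfr_spec : Claim_equal_mfr := by
  intro input_sent counts _hdom hpre
  unfold Spec_mfr mfr mfr_alt
  rw [PySem.List.foldl_append_singleton_eq_map, List.nil_append]
  exact List.map_congr_left (fun word _ => mfr_word_eq counts hpre.1 word)

theorem mfr_raises : Claim_raises_mfr := by
  unfold Claim_raises_mfr
  constructor
  · intro input_sent counts _hdom hr hpre
    obtain ⟨word, hw, p, hp, hk, hnil⟩ := hr
    exact hpre.2 word hw p hp hk hnil
  · exact ⟨by decide, by decide, by decide⟩

-- self-check consuming the raises claim: the raise witness indeed lies outside Pre_mfr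
theorem pvRaiseWitnessOutsidePre_ok : ¬ Pre_mfr (pvRaiseWitness_mfr.1) (pvRaiseWitness_mfr.2) := by
  have h := mfr_raises
  unfold Claim_raises_mfr at h
  exact h.1 _ _ h.2.1 h.2.2.1
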